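-- pv_equiv track=rewrite | github.com/SamuelYueYu/QO-BRA_1.0 | src/gen_func.py | clean_sequence_for_esm_scoring
-- ===== SOURCE A (Python) =====
-- def clean_sequence_for_esm_scoring(sequence):
--     """
--     Clean a QOBRA sequence for ESM scoring.
--
--     Removes binding site markers (+), chain separators (:), and terminators (X).
--     Only keeps valid amino acid characters for ESM compatibility.
--     Concatenates all chains into a single sequence for scoring.
--
--     This is consistent with clean_sequence_for_esm() in esm_loss.py but returns
--     a single concatenated string instead of a list of chains.
--
--     Parameters:
--     - sequence: QOBRA format sequence (may contain +, :, X markers)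
--
--     Returns:
--     - Clean amino acid sequence string (concatenated chains)
--     """
--     # Valid amino acid characters (same as esm_loss.py)
--     VALID_AA = 'ACDEFGHIKLMNPQRSTVWY'
--
--     # Truncate at terminator (consistent with esm_loss.py)
--     if 'X' in sequence:
--         sequence = sequence[:sequence.index('X')]
--
--     # Split by chain separator and clean each chain
--     raw_chains = sequence.split(':')
--
--     # Clean each chain: keep only valid amino acids
--     clean_chains = []
--     for chain in raw_chains:
--         clean_chain = ''.join(c for c in chain if c in VALID_AA)
--         if clean_chain:  # Only keep non-empty chains
--             clean_chains.append(clean_chain)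
--
--     # Concatenate all chains for single-sequence scoring
--     return ''.join(clean_chains)
-- ===== SOURCE B (Python) =====
-- def clean_sequence_for_esm_scoring(sequence):
--     VALID_AA = 'ACDEFGHIKLMNPQRSTVWY'
--     # One streaming pass: stop at the terminator, keep only valid amino acids.
--     out = []
--     for c in sequence:
--         if c == 'X':
--             break
--         if c in VALID_AA:
--             out.append(c)
--     return ''.join(out)
-- ===== Notes on version B (the rewrite author's own statement) =====
-- stated objective: simpler
-- what changed: Replaces A's staged pipeline (find 'X', slice, split on ':', per-chain filter loop with empty-chain bookkeeping, join) by one streaming pass with an early break at the first 'X' that appends valid amino acids to an accumulator, since ':' is not a valid amino acid and empty chains add nothing.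
import Mathlib
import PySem

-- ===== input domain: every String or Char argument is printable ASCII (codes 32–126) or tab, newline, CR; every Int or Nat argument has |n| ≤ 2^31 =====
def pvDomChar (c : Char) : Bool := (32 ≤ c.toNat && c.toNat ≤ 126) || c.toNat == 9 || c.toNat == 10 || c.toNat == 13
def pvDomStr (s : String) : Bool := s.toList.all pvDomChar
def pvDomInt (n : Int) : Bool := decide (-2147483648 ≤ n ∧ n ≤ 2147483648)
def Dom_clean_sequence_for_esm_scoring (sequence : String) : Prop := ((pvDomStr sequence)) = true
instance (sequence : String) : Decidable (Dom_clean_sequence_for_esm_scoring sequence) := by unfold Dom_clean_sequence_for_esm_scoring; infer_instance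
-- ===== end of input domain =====

-- B replaces A's staged pipeline (find/slice at 'X', split on ':', per-chain filter loop, join) by one streaming recursion that breaks at the first 'X' and keeps valid amino acids (simpler decomposition, same result).


-- VALID_AA = 'ACDEFGHIKLMNPQRSTVWY' (shared literal of both Pythons)
def pvValidAA : List Char := "ACDEFGHIKLMNPQRSTVWY".toList

-- ===== PORT A =====
def clean_sequence_for_esm_scoring (sequence : String) : String :=
  let s0 := sequence.toList
  -- if 'X' in sequence: sequence = sequence[:sequence.index('X')]
  let s := if PySem.Chars.isIn ['X'] s0 then
      PySem.Chars.slice s0 none (some (PySem.Chars.find s0 ['X']))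
    else s0
  -- raw_chains = sequence.split(':')
  let raw_chains := PySem.Chars.splitOn s [':']
  -- for chain in raw_chains: clean_chain = ''.join(c for c in chain if c in VALID_AA); if clean_chain: append
  let clean_chains := raw_chains.foldl (fun acc chain =>
      let clean_chain := chain.filter (fun c => PySem.Chars.isIn [c] pvValidAA)
      if clean_chain.isEmpty then acc else acc ++ [clean_chain]) []
  -- return ''.join(clean_chains)
  String.ofList (PySem.Chars.join [] clean_chains)

-- ===== PORT B =====
-- for c in sequence: if c == 'X': break; if c in VALID_AA: out.append(c)
def pvAltGo : List Char → List Char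
  | [] => []
  | c :: rest =>
      if c = 'X' then []
      else if PySem.Chars.isIn [c] pvValidAA then c :: pvAltGo rest
      else pvAltGo rest

def clean_sequence_for_esm_scoring_alt (sequence : String) : String :=
  String.ofList (pvAltGo sequence.toList)

-- ===== PRECONDITION & SPEC =====
def Spec_clean_sequence_for_esm_scoring (sequence : String) (out : String) : Prop := out = clean_sequence_for_esm_scoring_alt sequence
instance (sequence : String) (out : String) : Decidable (Spec_clean_sequence_for_esm_scoring sequence out) := by unfold Spec_clean_sequence_for_esm_scoring; infer_instance

-- ===== CLAIM (what is proved, stated in full; the proofs are below) =====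
def Claim_equal_clean_sequence_for_esm_scoring : Prop := ∀ (sequence : String), Dom_clean_sequence_for_esm_scoring sequence → Spec_clean_sequence_for_esm_scoring sequence (clean_sequence_for_esm_scoring sequence)

-- ===== LEMMAS AND PROOFS =====

-- flatten of splitOn's worker: the pieces, concatenated, are the input minus the separators
theorem pv_flatten_go (fuel : Nat) : ∀ (l cur : List Char) (acc : List (List Char)),
    l.length < fuel →
    (PySem.Chars.splitOn.go [':'] fuel l cur acc).flatten
      = acc.reverse.flatten ++ cur.reverse ++ l.filter (fun c => c != ':') := by
  induction fuel with
  | zero => intro l cur acc h; omega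
  | succ n ih =>
    intro l cur acc h
    cases l with
    | nil => simp [PySem.Chars.splitOn.go]
    | cons c rest =>
      by_cases hc : c = ':'
      · subst hc
        have : PySem.Chars.splitOn.go [':'] (n+1) (':' :: rest) cur acc
            = PySem.Chars.splitOn.go [':'] n rest [] (cur.reverse :: acc) := by
          simp [PySem.Chars.splitOn.go, List.isPrefixOf]
        rw [this, ih rest [] (cur.reverse :: acc) (by simpa using Nat.lt_of_succ_lt_succ h)]
        simp
      · have : PySem.Chars.splitOn.go [':'] (n+1) (c :: rest) cur acc
            = PySem.Chars.splitOn.go [':'] n rest (c :: cur) acc := by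
          simp [PySem.Chars.splitOn.go, List.isPrefixOf]
          exact fun h' => absurd h'.symm hc
        rw [this, ih rest (c :: cur) acc (by simpa using Nat.lt_of_succ_lt_succ h)]
        simp [hc]

theorem pv_flatten_splitOn (t : List Char) :
    (PySem.Chars.splitOn t [':']).flatten = t.filter (fun c => c != ':') := by
  have := pv_flatten_go (t.length + 1) t [] [] (by omega)
  simpa [PySem.Chars.splitOn] using this

-- A's accumulation loop: dropping empty filtered chains does not change the concatenation
theorem pv_fold_flatten (p : Char → Bool) : ∀ (chains : List (List Char)) (acc : List (List Char)),
    (chains.foldl (fun acc chain =>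
        let clean_chain := chain.filter p
        if clean_chain.isEmpty then acc else acc ++ [clean_chain]) acc).flatten
      = acc.flatten ++ (chains.flatten).filter p := by
  intro chains
  induction chains with
  | nil => simp
  | cons ch rest ih =>
    intro acc
    rw [List.foldl_cons, ih]
    simp only []
    by_cases h : (ch.filter p).isEmpty
    · have he : ch.filter p = [] := by simpa using h
      rw [if_pos h]
      simp [he]
    · rw [if_neg h]
      simp

-- A's whole pipeline equals: filter valid over the truncated list
theorem pv_main (t : List Char) :
    PySem.Chars.join [] ((PySem.Chars.splitOn t [':']).foldl (fun acc chain =>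
        let clean_chain := chain.filter (fun c => PySem.Chars.isIn [c] pvValidAA)
        if clean_chain.isEmpty then acc else acc ++ [clean_chain]) [])
      = t.filter (fun c => PySem.Chars.isIn [c] pvValidAA) := by
  have hj : ∀ (l : List (List Char)), PySem.Chars.join [] l = l.flatten := by
    intro l
    simp [PySem.Chars.join, List.intercalate]
    induction l with
    | nil => simp
    | cons x xs ih => cases xs <;> simp_all [List.intersperse]
  rw [hj, pv_fold_flatten, pv_flatten_splitOn]
  simp only [List.flatten_nil, List.nil_append, List.filter_filter]
  apply List.filter_congr
  intro c _
  by_cases hc : c = ':'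
  · subst hc; decide
  · simp [hc]

-- B's streaming recursion equals: filter valid over takeWhile (≠ 'X')
theorem pv_altGo_eq (l : List Char) :
    pvAltGo l = (l.takeWhile (fun c => c != 'X')).filter (fun c => PySem.Chars.isIn [c] pvValidAA) := by
  induction l with
  | nil => simp [pvAltGo]
  | cons c rest ih =>
    by_cases hc : c = 'X'
    · subst hc; simp [pvAltGo]
    · have hb : (c != 'X') = true := by simp [hc]
      by_cases hv : PySem.Chars.isIn [c] pvValidAA <;>
        simp [pvAltGo, hc, hv, ih, hb]

-- take n = takeWhile p when p holds strictly before n and fails at n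
theorem pv_take_eq_takeWhile (p : Char → Bool) : ∀ (l : List Char) (n : Nat),
    (∀ i, i < n → ∀ (h2 : i < l.length), p l[i]) →
    (∀ (h : n < l.length), ¬ p (l[n]'h) = true) →
    l.take n = l.takeWhile p := by
  intro l
  induction l with
  | nil => simp
  | cons c rest ih =>
    intro n hbefore hat
    cases n with
    | zero =>
      have : ¬ p c = true := by simpa using hat (by simp)
      simp [this]
    | succ m =>
      have hpc : p c = true := by simpa using hbefore 0 (by omega) (by simp)
      have := ih m (fun i hi h2 => by simpa using hbefore (i+1) (by omega) (by simpa using h2))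
        (fun h => by simpa using hat (by simpa using h))
      simp [hpc, this]

-- [X] is a prefix of l.drop i iff l[i] = 'X'
theorem pv_prefix_drop_iff (l : List Char) (i : Nat) (hi : i < l.length) :
    ['X'] <+: l.drop i ↔ l[i] = 'X' := by
  rw [List.drop_eq_getElem_cons hi]
  constructor
  · rintro ⟨t, ht⟩
    have h0 := congrArg (fun xs => xs.head?) ht
    simpa [List.getElem?_eq_getElem hi] using h0.symm
  · intro h
    exact ⟨l.drop (i+1), by simp [h]⟩

-- A's truncation (slice at find 'X' / identity) equals takeWhile (≠ 'X')
theorem pv_trunc_eq (l : List Char) :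
    (if PySem.Chars.isIn ['X'] l then
        PySem.Chars.slice l none (some (PySem.Chars.find l ['X']))
      else l)
      = l.takeWhile (fun c => c != 'X') := by
  by_cases h : PySem.Chars.isIn ['X'] l
  · rw [if_pos h]
    have hfind : 0 ≤ PySem.Chars.find l ['X'] := by
      rw [PySem.Chars.find_nonneg_iff]
      exact (PySem.Chars.isIn_iff_infix _ _).1 h
    set n : Nat := (PySem.Chars.find l ['X']).toNat with hn
    have hspec := PySem.Chars.find_spec (s := l) (sub := ['X']) hfind
    have hslice : PySem.Chars.slice l none (some (PySem.Chars.find l ['X'])) = l.take n := by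
      rw [PySem.Chars.slice_eq_listSlice]
      have he : PySem.Chars.find l ['X'] = (n : Int) := by omega
      rw [he, PySem.List.slice_to_natCast]
    rw [hslice]
    have hnlt : n < l.length := by
      rcases hspec.1 with ⟨t, ht⟩
      have : (l.drop n).length = 1 + t.length := by rw [← ht]; simp; omega
      simp at this; omega
    apply pv_take_eq_takeWhile
    · intro i hi h2
      have : ¬ ['X'] <+: l.drop i := hspec.2 i hi
      rw [pv_prefix_drop_iff l i h2] at this
      simpa using this
    · intro hlt
      have : l[n] = 'X' := (pv_prefix_drop_iff l n hnlt).1 hspec.1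
      simp [this]
  · rw [if_neg h]
    have hninf : ¬ ['X'] <:+: l := (PySem.Chars.isIn_eq_false_iff _ _).1 (by simpa using h)
    have hmem : 'X' ∉ l := fun hm => hninf ((List.singleton_infix_iff _ _).2 hm)
    exact (List.takeWhile_eq_self_iff.2 (fun x hx => by
      simp
      intro he; exact hmem (he ▸ hx))).symm

-- ===== VERDICT (by name: the statement is the Claim_ definition above) =====
theorem clean_sequence_for_esm_scoring_spec : Claim_equal_clean_sequence_for_esm_scoring := by
  intro sequence _
  unfold Spec_clean_sequence_for_esm_scoring clean_sequence_for_esm_scoring clean_sequence_for_esm_scoring_alt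
  rw [pv_altGo_eq, ← pv_trunc_eq sequence.toList]
  exact congrArg String.ofList (pv_main _)
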